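-- pv_equiv track=rewrite | github.com/annettetrann/slohackslite | UPDATEDformat_input.py | check_host_valid
-- ===== SOURCE A (Python) =====
-- def check_host_valid(host):
--     start = 0
--     extCount = 0
--     for i in range(len(host)):
--         if host[i: i +4 ] == 'www.':
--             start = i+4
--     for i in range(start, len(host)):
--         if host[i] == '.':
--             i += 1
--             while (i != len(host)) and (host[i] != '/'):
--                 extCount += 1
--                 i += 1
--     if (extCount != 2) and (extCount != 3):
--         return False
--     return True
-- ===== SOURCE B (Python) =====
-- def check_host_valid(host):
--     idx = host.rfind('www.')
--     start = idx + 4 if idx != -1 else 0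
--     total = 0
--     d = 0
--     for j in range(len(host) - 1, start - 1, -1):
--         if host[j] == '.':
--             total += d
--         d = 0 if host[j] == '/' else d + 1
--     return total in (2, 3)
-- ===== Notes on version B (the rewrite author's own statement) =====
-- stated objective: alternative
-- what changed: A rescans forward from every dot position to the next slash (and checks every slice for the last www marker); B finds the start with str.rfind and makes one backward pass maintaining the distance to the next slash, adding it at each dot.
import Mathlib
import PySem

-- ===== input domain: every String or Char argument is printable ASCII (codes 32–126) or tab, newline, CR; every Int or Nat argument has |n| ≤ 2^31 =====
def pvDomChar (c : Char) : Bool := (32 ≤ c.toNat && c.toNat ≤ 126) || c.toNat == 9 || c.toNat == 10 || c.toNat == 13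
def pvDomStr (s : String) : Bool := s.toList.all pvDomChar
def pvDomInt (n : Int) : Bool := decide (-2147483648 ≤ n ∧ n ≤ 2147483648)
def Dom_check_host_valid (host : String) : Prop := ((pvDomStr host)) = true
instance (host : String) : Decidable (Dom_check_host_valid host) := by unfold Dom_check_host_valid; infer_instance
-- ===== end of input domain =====

-- B replaces A's per-dot forward scans by a single backward pass that keeps the distance
-- to the next slash (objective: alternative, O(n) worst case).

-- ===== PORT A =====
-- inner `while (i != len(host)) and (host[i] != '/')`: every reached state has i ≤ len,
-- so the guard is written `i < len` (the same condition there) to make termination evident.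
def whileA (cs : List Char) (i : Int) (ec : Int) : Int :=
  if h : i < (cs.length : Int) ∧ PySem.List.pyGetD cs i ' ' ≠ '/' then
    whileA cs (i + 1) (ec + 1)
  else ec
termination_by ((cs.length : Int) - i).toNat
decreasing_by
  have := h.1; omega

def check_host_valid (host : String) : Bool :=
  let cs := host.toList
  let start : Int := (PySem.List.pyRange 0 (cs.length : Int) 1).foldl
    (fun st i => if PySem.List.slice cs (some i) (some (i + 4)) = ['w','w','w','.'] then i + 4 else st) 0
  let extCount : Int := (PySem.List.pyRange start (cs.length : Int) 1).foldl
    (fun ec i => if PySem.List.pyGetD cs i ' ' = '.' then whileA cs (i + 1) ec else ec) 0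
  if extCount ≠ 2 ∧ extCount ≠ 3 then false else true

-- ===== PORT B =====
def check_host_valid_alt (host : String) : Bool :=
  let cs := host.toList
  let idx : Int := PySem.Chars.rfind cs ['w','w','w','.']
  let start : Int := if idx ≠ -1 then idx + 4 else 0
  let p : Int × Int := (PySem.List.pyRange ((cs.length : Int) - 1) (start - 1) (-1)).foldl
    (fun (td : Int × Int) j =>
      ( if PySem.List.pyGetD cs j ' ' = '.' then td.1 + td.2 else td.1,
        if PySem.List.pyGetD cs j ' ' = '/' then 0 else td.2 + 1 )) (0, 0)
  p.1 == 2 || p.1 == 3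

-- ===== PRECONDITION & SPEC =====
def Spec_check_host_valid (host : String) (out : Bool) : Prop := out = check_host_valid_alt host
instance (host : String) (out : Bool) : Decidable (Spec_check_host_valid host out) := by unfold Spec_check_host_valid; infer_instance

-- ===== CLAIM (what is proved, stated in full; the proofs are below) =====
def Claim_equal_check_host_valid : Prop := ∀ (host : String), Dom_check_host_valid host → Spec_check_host_valid host (check_host_valid host)

-- ===== LEMMAS AND PROOFS =====
-- distC: distance from the head of a suffix to the first slash; extC: the extension-count sum;
-- specStart: the value A's first loop leaves in `start` after scanning positions < m.
def distC : List Char → Nat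
  | [] => 0
  | c :: t => if c = '/' then 0 else distC t + 1

def extC : List Char → Int
  | [] => 0
  | c :: t => (if c = '.' then (distC t : Int) else 0) + extC t

def specStart (cs : List Char) : Nat → Int
  | 0 => 0
  | m + 1 => if List.isPrefixOf ['w','w','w','.'] (cs.drop m) then (m : Int) + 4 else specStart cs m

lemma whileA_eq (cs : List Char) (i : Nat) (ec : Int) :
    whileA cs (i : Int) ec = ec + (distC (cs.drop i) : Int) := by
  suffices h : ∀ (k i : Nat) (ec : Int), cs.length ≤ i + k →
      whileA cs (i : Int) ec = ec + (distC (cs.drop i) : Int) by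
    exact h (cs.length) i ec (by omega)
  intro k
  induction k with
  | zero =>
    intro i ec hle
    rw [whileA]
    rw [List.drop_eq_nil_of_le (by omega)]
    simp [distC]
    omega
  | succ k ih =>
    intro i ec hle
    by_cases hi : i < cs.length
    · have hd : cs.drop i = cs[i] :: cs.drop (i+1) := List.drop_eq_getElem_cons hi
      have hg : PySem.List.pyGetD cs (i : Int) ' ' = cs[i] := by
        simp [PySem.List.pyGetD_natCast, List.getD_eq_getElem?_getD, List.getElem?_eq_getElem hi]
      rw [whileA]
      by_cases hc : cs[i] = '/'
      · simp [hg, hc, hd, distC]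
      · have : ((i : Int) + 1) = ((i + 1 : Nat) : Int) := by push_cast; ring
        rw [dif_pos ⟨by exact_mod_cast hi, by rw [hg]; exact hc⟩, this,
          ih (i+1) (ec+1) (by omega), hd]
        simp [distC, hc]
        omega
    · rw [whileA, List.drop_eq_nil_of_le (by omega)]
      simp [distC]
      omega

lemma slice_www (cs : List Char) (m : Nat) :
    (PySem.List.slice cs (some (m : Int)) (some ((m : Int) + 4)) = ['w','w','w','.'])
      ↔ List.isPrefixOf ['w','w','w','.'] (cs.drop m) = true := by
  have h4 : ((m : Int) + 4) = ((m : Int) + ((4 : Nat) : Int)) := by push_cast; ring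
  rw [h4, PySem.List.slice_natCast_add, List.isPrefixOf_iff_prefix, List.prefix_iff_eq_take]
  norm_num
  exact ⟨fun h => h.symm, fun h => h.symm⟩

lemma startA_eq (cs : List Char) (m : Nat) :
    (PySem.List.pyRange 0 (m : Int) 1).foldl
      (fun st i => if PySem.List.slice cs (some i) (some (i + 4)) = ['w','w','w','.'] then i + 4 else st) 0
      = specStart cs m := by
  induction m with
  | zero => simp [PySem.List.pyRange_one_eq_nil, specStart]
  | succ m ih =>
    have : ((m + 1 : Nat) : Int) = (m : Int) + 1 := by push_cast; ring
    rw [this, PySem.List.pyRange_one_succ_right (show (0:Int) ≤ (m:Int) by omega), List.foldl_append, ih]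
    simp only [List.foldl_cons, List.foldl_nil, specStart]
    by_cases h : List.isPrefixOf ['w','w','w','.'] (cs.drop m) = true
    · rw [if_pos ((slice_www cs m).mpr h), if_pos h]
    · rw [if_neg (fun hx => h ((slice_www cs m).mp hx)), if_neg (by simpa using h)]

lemma specStart_bounds (cs : List Char) (m : Nat) :
    0 ≤ specStart cs m ∧ specStart cs m ≤ (cs.length : Int) := by
  induction m with
  | zero => simp [specStart]
  | succ m ih =>
    rw [specStart]
    by_cases h : List.isPrefixOf ['w','w','w','.'] (cs.drop m) = true
    · rw [if_pos h]
      have hp := List.isPrefixOf_iff_prefix.mp h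
      have := hp.length_le
      simp [List.length_drop] at this
      constructor <;> omega
    · rw [if_neg (by simpa using h)]; exact ih

lemma go_eq (cs : List Char) (m : Nat) :
    (if PySem.Chars.rfind.go cs ['w','w','w','.'] m ≠ -1
       then PySem.Chars.rfind.go cs ['w','w','w','.'] m + 4 else 0)
      = specStart cs (m + 1) := by
  induction m with
  | zero =>
    rw [PySem.Chars.rfind.go, specStart]
    by_cases h : ['w','w','w','.'] <+: cs.drop 0
    · simp at h ⊢; simp [h]
    · simp at h ⊢; simp [h, specStart]
  | succ m ih =>
    rw [PySem.Chars.rfind.go, specStart]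
    by_cases h : List.isPrefixOf ['w','w','w','.'] (cs.drop (m + 1)) = true
    · rw [if_pos h, if_pos (show (((m + 1 : Nat) : Int)) ≠ -1 by omega), if_pos h]
    · rw [if_neg h, if_neg h]
      exact ih

lemma startB_eq (cs : List Char) :
    (if PySem.Chars.rfind cs ['w','w','w','.'] ≠ -1 then PySem.Chars.rfind cs ['w','w','w','.'] + 4 else 0)
      = specStart cs cs.length := by
  rw [PySem.Chars.rfind]
  cases hn : cs.length with
  | zero =>
    have hnil : cs = [] := List.eq_nil_of_length_eq_zero hn
    subst hnil
    simp [PySem.Chars.rfind.go, specStart]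
  | succ m =>
    have hdrop : cs.drop (m + 1) = [] := List.drop_eq_nil_of_le (by omega)
    rw [PySem.Chars.rfind.go, hdrop,
      if_neg (show ¬ (List.isPrefixOf ['w','w','w','.'] ([]:List Char) = true) by decide)]
    exact go_eq cs m

lemma extA_eq (cs : List Char) (k : Nat) : ∀ (s : Nat) (init : Int), cs.length = s + k →
    (PySem.List.pyRange (s : Int) (cs.length : Int) 1).foldl
      (fun ec i => if PySem.List.pyGetD cs i ' ' = '.' then whileA cs (i + 1) ec else ec) init
      = init + extC (cs.drop s) := by
  induction k with
  | zero =>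
    intro s init h
    rw [h]
    simp [PySem.List.pyRange_one_eq_nil, List.drop_eq_nil_of_le (by omega : cs.length ≤ s), extC]
  | succ k ih =>
    intro s init h
    have hs : s < cs.length := by omega
    rw [PySem.List.pyRange_one_cons (by exact_mod_cast hs), List.foldl_cons]
    have hg : PySem.List.pyGetD cs (s : Int) ' ' = cs[s] := by
      simp [PySem.List.pyGetD_natCast, List.getD_eq_getElem?_getD, List.getElem?_eq_getElem hs]
    have hcast : ((s : Int) + 1) = (((s + 1 : Nat)) : Int) := by push_cast; ring
    rw [hg, hcast, ih (s + 1) _ (by omega),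
      List.drop_eq_getElem_cons hs, extC]
    by_cases hc : cs[s] = '.'
    · rw [if_pos hc, if_pos hc, whileA_eq]
      ring
    · rw [if_neg hc, if_neg hc]
      ring

lemma extB_eq (cs : List Char) (k : Nat) : ∀ (s : Nat), cs.length = s + k →
    (PySem.List.pyRange ((cs.length : Int) - 1) ((s : Int) - 1) (-1)).foldl
      (fun (td : Int × Int) j =>
        ( if PySem.List.pyGetD cs j ' ' = '.' then td.1 + td.2 else td.1,
          if PySem.List.pyGetD cs j ' ' = '/' then 0 else td.2 + 1 )) (0, 0)
      = (extC (cs.drop s), (distC (cs.drop s) : Int)) := by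
  have hrev : ∀ s : Nat, PySem.List.pyRange ((cs.length : Int) - 1) ((s : Int) - 1) (-1)
      = (PySem.List.pyRange (s : Int) (cs.length : Int) 1).reverse := by
    intro s
    rw [PySem.List.pyRange_neg_one_eq_reverse]
    norm_num
  induction k with
  | zero =>
    intro s h
    rw [hrev, h]
    simp [PySem.List.pyRange_one_eq_nil, List.drop_eq_nil_of_le (by omega : cs.length ≤ s), extC, distC]
  | succ k ih =>
    intro s h
    have hs : s < cs.length := by omega
    have hcast : ((s : Int) + 1) = (((s + 1 : Nat)) : Int) := by push_cast; ring
    rw [hrev, PySem.List.pyRange_one_cons (by exact_mod_cast hs), List.reverse_cons,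
      List.foldl_append, hcast, ← hrev (s + 1), ih (s + 1) (by omega)]
    have hg : PySem.List.pyGetD cs (s : Int) ' ' = cs[s] := by
      simp [PySem.List.pyGetD_natCast, List.getD_eq_getElem?_getD, List.getElem?_eq_getElem hs]
    rw [List.foldl_cons, List.foldl_nil, hg, List.drop_eq_getElem_cons hs, extC, distC]
    by_cases hdot : cs[s] = '.'
    · by_cases hsl : cs[s] = '/'
      · rw [hdot] at hsl; exact absurd hsl (by decide)
      · rw [if_pos hdot, if_pos hdot, if_neg hsl, if_neg hsl]
        simp only [Prod.mk.injEq]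
        exact ⟨by ring, by push_cast; ring⟩
    · by_cases hsl : cs[s] = '/'
      · rw [if_neg hdot, if_neg hdot, if_pos hsl, if_pos hsl]
        simp
      · rw [if_neg hdot, if_neg hdot, if_neg hsl, if_neg hsl]
        simp only [Prod.mk.injEq]
        exact ⟨by ring, by push_cast; ring⟩


-- ===== VERDICT (by name: the statement is the Claim_ definition above) =====
theorem check_host_valid_spec : Claim_equal_check_host_valid := by
  intro host _
  unfold Spec_check_host_valid check_host_valid check_host_valid_alt
  simp only []
  generalize host.toList = cs
  rw [startA_eq, startB_eq]
  obtain ⟨h0, hle⟩ := specStart_bounds cs cs.length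
  have hsN : (((specStart cs cs.length).toNat : Int)) = specStart cs cs.length :=
    Int.toNat_of_nonneg h0
  rw [← hsN,
    extA_eq cs (cs.length - (specStart cs cs.length).toNat) (specStart cs cs.length).toNat 0
      (by omega),
    extB_eq cs (cs.length - (specStart cs cs.length).toNat) (specStart cs cs.length).toNat
      (by omega)]
  by_cases h2 : extC (cs.drop (specStart cs cs.length).toNat) = 2
  · simp [h2]
  · by_cases h3 : extC (cs.drop (specStart cs cs.length).toNat) = 3
    · simp [h3]
    · simp [h2, h3]
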